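-- pv_equiv track=rewrite | github.com/nemvince/school | prog/10_tizedik/py/feladatsor/21/solview/tasks/k_digikult_23okt_fl/sol.py | getBoxesNeeded
-- ===== SOURCE A (Python) =====
-- def getBoxesNeeded(items):
--     boxes = []
--     current_box = []
--     current_weight = 0
--
--     for item in items:
--         if current_weight + item > 20:
--             boxes.append(current_box)
--             current_box = []
--             current_weight = 0
--
--         current_box.append(item)
--         current_weight += item
--
--     if current_box:
--         boxes.append(current_box)
--
--     return [sum(box) for box in boxes]
-- ===== SOURCE B (Python) =====
-- def getBoxesNeeded(items):
--     # Prefix-sum formulation: compute prefix sums, mark the prefix value at each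
--     # box boundary in one scan over adjacent prefix pairs, and return the box
--     # weights as consecutive differences of the marked prefix values.
--     prefix = [0]
--     for x in items:
--         prefix.append(prefix[-1] + x)
--     marks = [0]
--     for p, q in zip(prefix, prefix[1:]):
--         if q - marks[-1] > 20:
--             marks.append(p)
--     marks.append(prefix[-1])
--     return [b - a for a, b in zip(marks, marks[1:])] if items else []
-- ===== Notes on version B (the rewrite author's own statement) =====
-- stated objective: alternative
-- what changed: Replaces the greedy box-building loop (list of boxes, current box, running weight, then a sum pass) with a prefix-sum formulation: build the prefix-sum array, mark the prefix value at each box boundary by scanning adjacent prefix pairs against the last mark, and emit box weights as consecutive differences of the marks.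
import Mathlib
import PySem

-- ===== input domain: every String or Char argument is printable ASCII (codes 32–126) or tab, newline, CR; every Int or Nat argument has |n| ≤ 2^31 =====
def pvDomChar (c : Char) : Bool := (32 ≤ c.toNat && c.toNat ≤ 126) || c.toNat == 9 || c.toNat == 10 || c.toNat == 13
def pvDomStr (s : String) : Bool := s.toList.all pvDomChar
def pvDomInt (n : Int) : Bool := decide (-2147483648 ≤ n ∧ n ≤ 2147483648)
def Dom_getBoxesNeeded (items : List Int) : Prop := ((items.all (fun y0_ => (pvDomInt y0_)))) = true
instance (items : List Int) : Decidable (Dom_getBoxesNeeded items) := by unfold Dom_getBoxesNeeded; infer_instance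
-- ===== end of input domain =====

-- B recasts A's greedy box-building loop as prefix sums + boundary marks + consecutive differences (alternative algorithm, same cost).


-- ===== PORT A =====
-- A's loop body: state (boxes, current_box, current_weight), branch order as in the Python.
def pvStepA : List (List Int) × List Int × Int → Int → List (List Int) × List Int × Int :=
  fun st item =>
    let boxes := st.1
    let current_box := st.2.1
    let current_weight := st.2.2
    let st' := if current_weight + item > 20 then
        (boxes ++ [current_box], ([] : List Int), (0 : Int))
      else (boxes, current_box, current_weight)
    (st'.1, st'.2.1 ++ [item], st'.2.2 + item)

-- Literal port of A: fold the loop body over items, append the last box if nonempty, map sum.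
def getBoxesNeeded (items : List Int) : List Int :=
  let s := items.foldl pvStepA ([], [], 0)
  let boxes := if s.2.1 ≠ [] then s.1 ++ [s.2.1] else s.1
  boxes.map (fun box => box.foldl (· + ·) 0)

-- ===== PORT B =====
-- Source B's first loop body: extend the prefix-sum list (`prefix[-1]` = getLast?.getD 0, list never empty).
def pvStepP : List Int → Int → List Int :=
  fun p x => p ++ [(p.getLast?.getD 0) + x]

-- Source B's second loop body: mark the prefix value p at a box boundary when q overshoots the last mark by more than 20.
def pvStepM : List Int → Int × Int → List Int :=
  fun m pq => if pq.2 - (m.getLast?.getD 0) > 20 then m ++ [pq.1] else m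

-- Literal port of Source B: prefix sums, boundary marks from adjacent prefix pairs, consecutive differences.
def getBoxesNeeded_alt (items : List Int) : List Int :=
  let pre := items.foldl pvStepP [0]
  let marks := (pre.zip pre.tail).foldl pvStepM [0]
  let marks2 := marks ++ [pre.getLast?.getD 0]
  if items = [] then [] else (marks2.zip marks2.tail).map (fun ab => ab.2 - ab.1)

-- ===== PRECONDITION & SPEC =====
def Spec_getBoxesNeeded (items : List Int) (out : List Int) : Prop := out = getBoxesNeeded_alt items
instance (items : List Int) (out : List Int) : Decidable (Spec_getBoxesNeeded items out) := by unfold Spec_getBoxesNeeded; infer_instance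

-- ===== CLAIM (what is proved, stated in full; the proofs are below) =====
def Claim_equal_getBoxesNeeded : Prop := ∀ (items : List Int), Dom_getBoxesNeeded items → Spec_getBoxesNeeded items (getBoxesNeeded items)

-- ===== LEMMAS AND PROOFS =====

def pvSum (box : List Int) : Int := box.foldl (· + ·) 0

def pvScan : Int → List Int → List Int
  | t, [] => [t]
  | t, x :: xs => t :: pvScan (t + x) xs

def pvPairs (t : Int) (xs : List Int) : List (Int × Int) :=
  (pvScan t xs).zip (pvScan t xs).tail

def pvDiffs (m : List Int) : List Int :=
  (m.zip m.tail).map (fun ab => ab.2 - ab.1)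

theorem pvSum_append (cur : List Int) (x : Int) :
    pvSum (cur ++ [x]) = pvSum cur + x := by
  simp [pvSum, List.foldl_append]

theorem pvScan_eq_cons (t : Int) (xs : List Int) :
    pvScan t xs = t :: (pvScan t xs).tail := by
  cases xs <;> simp [pvScan]

theorem pvLast_append (m : List Int) (t : Int) :
    ((m ++ [t]).getLast?.getD 0) = t := by
  simp

theorem pvLast_cons (a : Int) (l : List Int) (h : l ≠ []) :
    ((a :: l).getLast?.getD 0) = (l.getLast?.getD 0) := by
  cases l with
  | nil => exact absurd rfl h
  | cons b r => simp [List.getLast?_cons_cons]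

theorem pvScan_ne_nil (t : Int) (xs : List Int) : pvScan t xs ≠ [] := by
  cases xs <;> simp [pvScan]

theorem pvPrefix_fold (xs : List Int) : ∀ (p0 : List Int), p0 ≠ [] →
    List.foldl pvStepP p0 xs = p0 ++ (pvScan (p0.getLast?.getD 0) xs).tail := by
  induction xs with
  | nil => intro p0 h; simp [pvScan]
  | cons x xs ih =>
    intro p0 h
    rw [List.foldl_cons]
    rw [show pvStepP p0 x = p0 ++ [(p0.getLast?.getD 0) + x] from rfl]
    rw [ih _ (by simp), pvLast_append]
    rw [show pvScan (p0.getLast?.getD 0) (x :: xs)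
        = (p0.getLast?.getD 0) :: pvScan (p0.getLast?.getD 0 + x) xs from rfl]
    rw [List.tail_cons, List.append_assoc]
    rw [show ([(p0.getLast?.getD 0) + x] : List Int)
        ++ (pvScan (p0.getLast?.getD 0 + x) xs).tail
        = (p0.getLast?.getD 0 + x) :: (pvScan (p0.getLast?.getD 0 + x) xs).tail from rfl]
    rw [← pvScan_eq_cons]

theorem pvPairs_cons (t x : Int) (xs : List Int) :
    pvPairs t (x :: xs) = (t, t + x) :: pvPairs (t + x) xs := by
  unfold pvPairs
  rw [show pvScan t (x :: xs) = t :: pvScan (t + x) xs from rfl]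
  conv_lhs => rw [pvScan_eq_cons (t + x) xs]
  simp only [List.tail_cons, List.zip_cons_cons]
  rw [← pvScan_eq_cons]

theorem pvDiffs_append (m : List Int) (t : Int) (h : m ≠ []) :
    pvDiffs (m ++ [t]) = pvDiffs m ++ [t - (m.getLast?.getD 0)] := by
  induction m with
  | nil => exact absurd rfl h
  | cons a l ih =>
    cases l with
    | nil => simp [pvDiffs]
    | cons b r =>
      have h2 : (b :: r) ≠ [] := by simp
      have hrec := ih h2
      simp only [pvDiffs] at hrec ⊢
      rw [pvLast_cons a (b :: r) h2]
      simp only [List.cons_append, List.zip_cons_cons, List.tail_cons, List.map_cons] at hrec ⊢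
      rw [hrec]

theorem pvCur_ne_nil (xs : List Int) : ∀ boxes cur w, cur ≠ [] ∨ xs ≠ [] →
    (xs.foldl pvStepA (boxes, cur, w)).2.1 ≠ [] := by
  induction xs with
  | nil =>
    intro boxes cur w h
    simpa using h.resolve_right (by simp)
  | cons x xs ih =>
    intro boxes cur w _
    rw [List.foldl_cons]
    rcases xs with _ | ⟨y, ys⟩
    · simp only [List.foldl_nil, pvStepA]
      split <;> simp
    · exact ih _ _ _ (Or.inr (by simp))

-- Simulation: B's mark list tracks A's state — last mark = current prefix minus current
-- weight, and the consecutive differences of the marks are the finished box sums.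
theorem pvSim (xs : List Int) : ∀ (boxes : List (List Int)) (cur : List Int) (w t : Int) (marks : List Int),
    marks ≠ [] → (marks.getLast?.getD 0) = t - w → w = pvSum cur →
    pvDiffs marks = boxes.map pvSum →
    ((pvPairs t xs).foldl pvStepM marks) ≠ [] ∧
    (((pvPairs t xs).foldl pvStepM marks).getLast?.getD 0)
      = ((pvScan t xs).getLast?.getD 0) - (xs.foldl pvStepA (boxes, cur, w)).2.2 ∧
    pvDiffs ((pvPairs t xs).foldl pvStepM marks)
      = (xs.foldl pvStepA (boxes, cur, w)).1.map pvSum ∧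
    (xs.foldl pvStepA (boxes, cur, w)).2.2 = pvSum (xs.foldl pvStepA (boxes, cur, w)).2.1 := by
  induction xs with
  | nil =>
    intro boxes cur w t marks h1 h2 h3 h4
    refine ⟨h1, ?_, h4, h3⟩
    simp [pvPairs, pvScan, h2]
  | cons x xs ih =>
    intro boxes cur w t marks h1 h2 h3 h4
    rw [pvPairs_cons, List.foldl_cons, List.foldl_cons]
    have hscan : ((pvScan t (x :: xs)).getLast?.getD 0) = ((pvScan (t + x) xs).getLast?.getD 0) := by
      rw [show pvScan t (x :: xs) = t :: pvScan (t + x) xs from rfl]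
      exact pvLast_cons t _ (pvScan_ne_nil _ _)
    rw [hscan]
    by_cases hc : w + x > 20
    · have hA : pvStepA (boxes, cur, w) x = (boxes ++ [cur], [x], x) := by
        simp only [pvStepA]; rw [if_pos hc]; simp
      have hM : pvStepM marks (t, t + x) = marks ++ [t] := by
        simp only [pvStepM]
        rw [if_pos (by rw [h2]; omega)]
      rw [hA, hM]
      refine ih (boxes ++ [cur]) [x] x (t + x) (marks ++ [t]) (by simp) ?_ ?_ ?_
      · rw [pvLast_append]; ring
      · simp [pvSum]
      · rw [pvDiffs_append marks t h1, h4, h2, h3]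
        have : t - (t - pvSum cur) = pvSum cur := by ring
        rw [this, List.map_append, List.map_singleton]
    · have hA : pvStepA (boxes, cur, w) x = (boxes, cur ++ [x], w + x) := by
        simp only [pvStepA]; rw [if_neg hc]
      have hM : pvStepM marks (t, t + x) = marks := by
        simp only [pvStepM]
        rw [if_neg (by rw [h2]; omega)]
      rw [hA, hM]
      exact ih boxes (cur ++ [x]) (w + x) (t + x) marks h1
        (by rw [h2]; ring) (by rw [pvSum_append, h3]) h4

theorem pvA_eq (items : List Int) :
    getBoxesNeeded items =
      (if (items.foldl pvStepA ([], [], 0)).2.1 ≠ []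
        then (items.foldl pvStepA ([], [], 0)).1 ++ [(items.foldl pvStepA ([], [], 0)).2.1]
        else (items.foldl pvStepA ([], [], 0)).1).map pvSum := rfl

theorem pvB_eq (items : List Int) :
    getBoxesNeeded_alt items =
      (if items = [] then []
       else pvDiffs (((pvPairs 0 items).foldl pvStepM [0])
              ++ [((pvScan 0 items).getLast?.getD 0)])) := by
  unfold getBoxesNeeded_alt pvDiffs pvPairs
  have hp : items.foldl pvStepP [0] = pvScan 0 items := by
    rw [pvPrefix_fold items [0] (by simp)]
    simp only [List.getLast?_singleton, Option.getD_some]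
    exact (pvScan_eq_cons 0 items).symm
  rw [hp]

-- ===== VERDICT (by name: the statement is the Claim_ definition above) =====
theorem getBoxesNeeded_spec : Claim_equal_getBoxesNeeded := by
  intro items _
  unfold Spec_getBoxesNeeded
  cases items with
  | nil => decide
  | cons x xs =>
    have hne : (x :: xs : List Int) ≠ [] := by simp
    have hs := pvSim (x :: xs) [] [] 0 0 [0] (by simp) (by simp) (by simp [pvSum])
      (by simp [pvDiffs])
    obtain ⟨hFBne, hlast, hdiffs, hw⟩ := hs
    have hcur := pvCur_ne_nil (x :: xs) [] [] 0 (Or.inr hne)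
    rw [pvA_eq, pvB_eq, if_neg hne, if_pos hcur]
    rw [pvDiffs_append _ _ hFBne, hdiffs, hlast]
    rw [show ((pvScan 0 (x :: xs)).getLast?.getD 0)
        - (((pvScan 0 (x :: xs)).getLast?.getD 0)
            - ((x :: xs).foldl pvStepA ([], [], 0)).2.2)
        = ((x :: xs).foldl pvStepA ([], [], 0)).2.2 by ring]
    rw [hw]
    simp
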